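-- pv_equiv track=rewrite | github.com/Alexa21x/UAText | merge_1.py | decimal_to_hex_reversed
-- ===== SOURCE A (Python) =====
-- def decimal_to_hex_reversed(decimal):
--     hex_digits = []
--     while decimal > 0:
--         remainder = decimal % 16
--         hex_digits.append(str(remainder) if remainder < 10 else chr(remainder - 10 + ord('A')))
--         decimal //= 16
--     hex_digits.reverse()
--     hex_string = ''.join(hex_digits).zfill(6)
--     return f"{hex_string[:2]} {hex_string[2:4]} {hex_string[4:]}"
-- ===== SOURCE B (Python) =====
-- def decimal_to_hex_reversed(decimal):
--     s = format(decimal, 'X') if decimal > 0 else ''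
--     s = s.zfill(6)
--     return f"{s[:2]} {s[2:4]} {s[4:]}"
-- ===== Notes on version B (the rewrite author's own statement) =====
-- stated objective: idiomatic
-- what changed: Replaces the manual while-loop digit extraction plus list reversal with the built-in base conversion format(decimal, 'X'), then zfill and slicing as before.
import Mathlib
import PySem

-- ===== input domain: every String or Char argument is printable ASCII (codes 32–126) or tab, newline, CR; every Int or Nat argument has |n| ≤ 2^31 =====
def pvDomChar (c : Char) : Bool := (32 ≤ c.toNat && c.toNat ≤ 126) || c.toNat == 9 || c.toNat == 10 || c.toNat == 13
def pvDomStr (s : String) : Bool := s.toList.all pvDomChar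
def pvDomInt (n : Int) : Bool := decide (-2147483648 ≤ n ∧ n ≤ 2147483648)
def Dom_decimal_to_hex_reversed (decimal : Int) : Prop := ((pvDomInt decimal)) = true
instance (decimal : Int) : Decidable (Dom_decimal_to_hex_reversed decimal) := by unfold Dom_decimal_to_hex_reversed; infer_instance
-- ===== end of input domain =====

-- B replaces A's manual while-loop digit extraction (append + reverse) by the built-in
-- base conversion format(decimal, 'X'); objective: idiomatic, same cost.

-- ===== PORT A =====
-- str(remainder) if remainder < 10 else chr(remainder - 10 + ord('A'))
def pyA_digit (r : Int) : List Char :=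
  if r < 10 then PySem.Int.toChars r else [Char.ofNat (r - 10 + 65).toNat]

-- the while loop, state = hex_digits (each entry one appended string, as a char list)
def pyA_loop (decimal : Int) (hex_digits : List (List Char)) : List (List Char) :=
  if decimal > 0 then
    pyA_loop (PySem.Int.floordiv decimal 16)
      (hex_digits ++ [pyA_digit (PySem.Int.mod decimal 16)])
  else hex_digits
termination_by decimal.toNat
decreasing_by
  have h16 : PySem.Int.floordiv decimal 16 = decimal / 16 :=
    PySem.Int.floordiv_eq_ediv_of_pos (by omega)
  rw [h16]; omega

def decimal_to_hex_reversed (decimal : Int) : String :=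
  let hex_digits := (pyA_loop decimal []).reverse
  let hex_string := PySem.Chars.zfill hex_digits.flatten 6
  String.ofList (PySem.List.slice hex_string none (some 2) ++
    ' ' :: (PySem.List.slice hex_string (some 2) (some 4) ++
    ' ' :: PySem.List.slice hex_string (some 4) none))

-- ===== PORT B =====
def hexDigitU (r : Nat) : Char := if r < 10 then Char.ofNat (48 + r) else Char.ofNat (55 + r)

-- port of format(n, 'X'); exact for n > 0, the only way B applies it
def hexUpper (n : Nat) : List Char :=
  if n = 0 then [] else hexUpper (n / 16) ++ [hexDigitU (n % 16)]
termination_by n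
decreasing_by exact Nat.div_lt_self (by omega) (by omega)

def decimal_to_hex_reversed_alt (decimal : Int) : String :=
  let s := if decimal > 0 then hexUpper decimal.toNat else []
  let s := PySem.Chars.zfill s 6
  String.ofList (s.take 2 ++ ' ' :: ((s.drop 2).take 2 ++ ' ' :: s.drop 4))

-- ===== PRECONDITION & SPEC =====
def Spec_decimal_to_hex_reversed (decimal : Int) (out : String) : Prop := out = decimal_to_hex_reversed_alt decimal
instance (decimal : Int) (out : String) : Decidable (Spec_decimal_to_hex_reversed decimal out) := by unfold Spec_decimal_to_hex_reversed; infer_instance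

-- ===== CLAIM (what is proved, stated in full; the proofs are below) =====
def Claim_equal_decimal_to_hex_reversed : Prop := ∀ (decimal : Int), Dom_decimal_to_hex_reversed decimal → Spec_decimal_to_hex_reversed decimal (decimal_to_hex_reversed decimal)

-- ===== LEMMAS AND PROOFS =====

lemma pyA_loop_acc (fuel : Nat) (d : Int) (acc : List (List Char)) (hf : d.toNat ≤ fuel) :
    pyA_loop d acc = acc ++ pyA_loop d [] := by
  induction fuel generalizing d acc with
  | zero =>
    conv_lhs => rw [pyA_loop]
    conv_rhs => rw [pyA_loop]
    have : ¬ d > 0 := by omega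
    simp [this]
  | succ n ih =>
    conv_lhs => rw [pyA_loop]
    conv_rhs => rw [pyA_loop]
    by_cases h : d > 0
    · simp only [h, if_true]
      have hlt : (PySem.Int.floordiv d 16).toNat ≤ n := by
        rw [PySem.Int.floordiv_eq_ediv_of_pos (by omega)]; omega
      rw [ih _ _ hlt, ih _ ([] ++ [pyA_digit (PySem.Int.mod d 16)]) hlt]
      simp
    · simp [h]

lemma digit_eq (m : Nat) (hm : m < 16) : pyA_digit (m : Int) = [hexDigitU m] := by
  interval_cases m <;> decide

lemma loop_flatten (fuel : Nat) (d : Int) (hf : d.toNat ≤ fuel) :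
    ((pyA_loop d []).reverse).flatten = hexUpper d.toNat := by
  induction fuel generalizing d with
  | zero =>
    have hd : ¬ d > 0 := by omega
    rw [pyA_loop, hexUpper]
    have : d.toNat = 0 := by omega
    simp [hd, this]
  | succ n ih =>
    by_cases h : d > 0
    · have hdiv : PySem.Int.floordiv d 16 = d / 16 :=
        PySem.Int.floordiv_eq_ediv_of_pos (by omega)
      have hmod : PySem.Int.mod d 16 = d % 16 :=
        PySem.Int.mod_eq_emod_of_pos (by omega)
      have htn : (d / 16).toNat = d.toNat / 16 := by omega
      have hmn : d % 16 = ((d.toNat % 16 : Nat) : Int) := by omega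
      rw [pyA_loop]
      simp only [h, if_true, List.nil_append]
      rw [pyA_loop_acc n _ _ (by rw [hdiv]; omega)]
      rw [List.reverse_append, List.flatten_append]
      rw [ih _ (by rw [hdiv]; omega)]
      rw [hdiv, hmod, htn, hmn, digit_eq _ (Nat.mod_lt _ (by omega))]
      conv_rhs => rw [hexUpper]
      have hnz : d.toNat ≠ 0 := by omega
      simp [hnz]
    · rw [pyA_loop, hexUpper]
      have : d.toNat = 0 := by omega
      simp [h, this]

lemma slice_take2 (xs : List Char) : PySem.List.slice xs none (some 2) = xs.take 2 := by
  rw [show ((2:Int)) = ((2:Nat):Int) by norm_num, PySem.List.slice_to_natCast]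

lemma slice_mid (xs : List Char) :
    PySem.List.slice xs (some 2) (some 4) = (xs.drop 2).take 2 := by
  rw [show ((2:Int)) = ((2:Nat):Int) by norm_num,
      show ((4:Int)) = ((4:Nat):Int) by norm_num, PySem.List.slice_natCast]

lemma slice_drop4 (xs : List Char) : PySem.List.slice xs (some 4) none = xs.drop 4 := by
  rw [show ((4:Int)) = ((4:Nat):Int) by norm_num, PySem.List.slice_from_natCast]

-- ===== VERDICT (by name: the statement is the Claim_ definition above) =====
theorem decimal_to_hex_reversed_spec : Claim_equal_decimal_to_hex_reversed := by
  intro d _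
  unfold Spec_decimal_to_hex_reversed decimal_to_hex_reversed decimal_to_hex_reversed_alt
  have hflat : ((pyA_loop d []).reverse).flatten
      = (if d > 0 then hexUpper d.toNat else []) := by
    by_cases h : d > 0
    · simp only [h, if_pos]; exact loop_flatten d.toNat d le_rfl
    · simp only [h, if_neg, not_false_iff]
      rw [pyA_loop]
      simp [h]
  simp only [hflat, slice_take2, slice_mid, slice_drop4]
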